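-- pv_equiv track=rewrite | github.com/AndreAmaduzzi/advent_of_code | 2022/Day_3/main02.py | duplicate_value
-- ===== SOURCE A (Python) =====
-- import string
--
-- def duplicate_value(d: str) -> int:
--
--     count = 0
--     lowercase_element = list(string.ascii_lowercase)
--     uppercase_element = list(string.ascii_uppercase)
--
--     for item in d:
--         if item in lowercase_element:
--             for value, ascii_item in enumerate(lowercase_element):
--                 if item == ascii_item:
--                     count += value + 1
--         elif item in uppercase_element:
--             for value, ascii_item in enumerate(uppercase_element):
--                 if item == ascii_item:
--                     count += value + 27
--     return count
-- ===== SOURCE B (Python) =====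
-- def duplicate_value(d: str) -> int:
--     total = 0
--     for item in d:
--         if 'a' <= item <= 'z':
--             total += ord(item) - ord('a') + 1
--         elif 'A' <= item <= 'Z':
--             total += ord(item) - ord('A') + 27
--     return total
-- ===== Notes on version B (the rewrite author's own statement) =====
-- stated objective: faster
-- what changed: Replaced A's per-character membership test plus inner enumerate scan over 26-letter alphabet lists with a single pass computing each priority by closed-form ASCII range arithmetic.
import Mathlib
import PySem

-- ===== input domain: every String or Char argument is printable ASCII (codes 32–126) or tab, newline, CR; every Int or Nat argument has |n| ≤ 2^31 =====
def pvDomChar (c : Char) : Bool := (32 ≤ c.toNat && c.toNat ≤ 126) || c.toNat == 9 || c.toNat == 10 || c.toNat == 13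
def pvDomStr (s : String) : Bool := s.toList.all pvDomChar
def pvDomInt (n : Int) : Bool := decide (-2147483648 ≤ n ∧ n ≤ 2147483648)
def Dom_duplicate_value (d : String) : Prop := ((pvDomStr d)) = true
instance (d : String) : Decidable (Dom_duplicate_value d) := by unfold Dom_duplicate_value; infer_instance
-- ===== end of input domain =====

-- B replaces A's membership test + inner enumerate scan over 26-letter alphabet lists
-- by one pass computing each character's priority with closed-form ASCII range arithmetic (simpler).

-- ===== PORT A =====
-- list(string.ascii_lowercase) / list(string.ascii_uppercase)
def pvLowerA : List Char := "abcdefghijklmnopqrstuvwxyz".toList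
def pvUpperA : List Char := "ABCDEFGHIJKLMNOPQRSTUVWXYZ".toList

def duplicate_value (d : String) : Int :=
  d.toList.foldl (fun count item =>
    if item ∈ pvLowerA then
      (PySem.List.enumerate pvLowerA).foldl
        (fun c ve => if item = ve.2 then c + (ve.1 + 1) else c) count
    else if item ∈ pvUpperA then
      (PySem.List.enumerate pvUpperA).foldl
        (fun c ve => if item = ve.2 then c + (ve.1 + 27) else c) count
    else count) 0

-- ===== PORT B =====
-- 'a' <= item <= 'z' is the code-point comparison 97 ≤ item.toNat ≤ 122; ord(item) = item.toNat
def duplicate_value_alt (d : String) : Int :=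
  d.toList.foldl (fun total item =>
    if 97 ≤ item.toNat ∧ item.toNat ≤ 122 then total + ((item.toNat : Int) - 97 + 1)
    else if 65 ≤ item.toNat ∧ item.toNat ≤ 90 then total + ((item.toNat : Int) - 65 + 27)
    else total) 0

-- ===== PRECONDITION & SPEC =====
def Spec_duplicate_value (d : String) (out : Int) : Prop := out = duplicate_value_alt d
instance (d : String) (out : Int) : Decidable (Spec_duplicate_value d out) := by unfold Spec_duplicate_value; infer_instance

-- ===== CLAIM (what is proved, stated in full; the proofs are below) =====
def Claim_equal_duplicate_value : Prop := ∀ (d : String), Dom_duplicate_value d → Spec_duplicate_value d (duplicate_value d)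

-- ===== LEMMAS AND PROOFS =====

lemma pv_char_eq_of_toNat {c a : Char} (h : a.toNat = c.toNat) : a = c :=
  Char.ext (UInt32.toNat_inj.mp (by simpa using h))

lemma pv_mem_lower (c : Char) (h1 : 97 ≤ c.toNat) (h2 : c.toNat ≤ 122) : c ∈ pvLowerA := by
  have hm : c.toNat ∈ pvLowerA.map Char.toNat := by
    interval_cases h : c.toNat <;> decide
  obtain ⟨a, ha, hae⟩ := List.mem_map.mp hm
  exact (pv_char_eq_of_toNat hae) ▸ ha

lemma pv_mem_upper (c : Char) (h1 : 65 ≤ c.toNat) (h2 : c.toNat ≤ 90) : c ∈ pvUpperA := by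
  have hm : c.toNat ∈ pvUpperA.map Char.toNat := by
    interval_cases h : c.toNat <;> decide
  obtain ⟨a, ha, hae⟩ := List.mem_map.mp hm
  exact (pv_char_eq_of_toNat hae) ▸ ha

lemma pv_fold_notmem (l : List Char) (c : Char) (k : Int) (count s : Int)
    (h : c ∉ l) :
    (PySem.List.enumerate l s).foldl
      (fun acc ve => if c = ve.2 then acc + (ve.1 + k) else acc) count = count := by
  induction l generalizing count s with
  | nil => simp [PySem.List.enumerate_nil]
  | cons x xs ih =>
      have hx : c ≠ x := fun hcx => h (hcx ▸ List.mem_cons_self)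
      simp only [PySem.List.enumerate_cons, List.foldl_cons, if_neg hx]
      exact ih count (s + 1) (fun hm => h (List.mem_cons_of_mem _ hm))

lemma pv_fold_idx (l : List Char) (c : Char) (k : Int) (count s : Int) (i : Nat)
    (hnd : l.Nodup) (hi : i < l.length) (hc : l[i] = c) :
    (PySem.List.enumerate l s).foldl
      (fun acc ve => if c = ve.2 then acc + (ve.1 + k) else acc) count
      = count + ((s + i) + k) := by
  induction l generalizing count s i with
  | nil => simp at hi
  | cons x xs ih =>
      simp only [PySem.List.enumerate_cons, List.foldl_cons]
      rcases List.nodup_cons.mp hnd with ⟨hx, hnd'⟩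
      cases i with
      | zero =>
          simp only [List.getElem_cons_zero] at hc
          rw [if_pos hc.symm, pv_fold_notmem _ _ _ _ _ (hc ▸ hx)]
          push_cast; ring
      | succ j =>
          simp only [List.getElem_cons_succ] at hc
          have hj : j < xs.length := by simpa using hi
          have hcx : c ≠ x := fun hcx => hx (hcx ▸ hc ▸ List.getElem_mem hj)
          rw [if_neg hcx, ih count (s + 1) j hnd' hj hc]
          push_cast; ring

-- the two per-character step functions agree on every character
lemma pv_step_eq (count : Int) (c : Char) :
    (if c ∈ pvLowerA then
      (PySem.List.enumerate pvLowerA).foldl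
        (fun acc ve => if c = ve.2 then acc + (ve.1 + 1) else acc) count
    else if c ∈ pvUpperA then
      (PySem.List.enumerate pvUpperA).foldl
        (fun acc ve => if c = ve.2 then acc + (ve.1 + 27) else acc) count
    else count)
    =
    (if 97 ≤ c.toNat ∧ c.toNat ≤ 122 then count + ((c.toNat : Int) - 97 + 1)
     else if 65 ≤ c.toNat ∧ c.toNat ≤ 90 then count + ((c.toNat : Int) - 65 + 27)
     else count) := by
  by_cases h1 : 97 ≤ c.toNat ∧ c.toNat ≤ 122
  · obtain ⟨ha, hb⟩ := h1
    have hmem := pv_mem_lower c ha hb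
    have hlen : pvLowerA.length = 26 := by decide
    have hmap : pvLowerA.map Char.toNat = List.map (fun i => 97 + i) (List.range 26) := by decide
    have hi : c.toNat - 97 < pvLowerA.length := by omega
    have hg : pvLowerA[c.toNat - 97] = c := by
      apply pv_char_eq_of_toNat
      have h9 : pvLowerA[c.toNat - 97]?.map Char.toNat
          = ((List.range 26)[c.toNat - 97]?).map (fun i => 97 + i) := by
        rw [← List.getElem?_map, hmap, List.getElem?_map]
      rw [List.getElem?_eq_getElem hi,
        List.getElem?_eq_getElem (by simpa using (hlen ▸ hi))] at h9
      simp only [Option.map_some, Option.some.injEq, List.getElem_range] at h9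
      omega
    rw [if_pos hmem, if_pos ⟨ha, hb⟩, pv_fold_idx _ _ _ _ _ _ (by decide) hi hg]
    have : ((c.toNat - 97 : Nat) : Int) = (c.toNat : Int) - 97 := by omega
    rw [this]; ring
  · by_cases h2 : 65 ≤ c.toNat ∧ c.toNat ≤ 90
    · obtain ⟨ha, hb⟩ := h2
      have hmem := pv_mem_upper c ha hb
      have hnl : c ∉ pvLowerA := by
        intro hm
        have hbound : ∀ t ∈ pvLowerA.map Char.toNat, 97 ≤ t ∧ t ≤ 122 := by decide
        exact h1 (hbound _ (List.mem_map_of_mem hm))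
      have hlen : pvUpperA.length = 26 := by decide
      have hmap : pvUpperA.map Char.toNat = List.map (fun i => 65 + i) (List.range 26) := by decide
      have hi : c.toNat - 65 < pvUpperA.length := by omega
      have hg : pvUpperA[c.toNat - 65] = c := by
        apply pv_char_eq_of_toNat
        have h9 : pvUpperA[c.toNat - 65]?.map Char.toNat
            = ((List.range 26)[c.toNat - 65]?).map (fun i => 65 + i) := by
          rw [← List.getElem?_map, hmap, List.getElem?_map]
        rw [List.getElem?_eq_getElem hi,
          List.getElem?_eq_getElem (by simpa using (hlen ▸ hi))] at h9
        simp only [Option.map_some, Option.some.injEq, List.getElem_range] at h9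
        omega
      rw [if_neg hnl, if_pos hmem, if_neg h1, if_pos ⟨ha, hb⟩,
        pv_fold_idx _ _ _ _ _ _ (by decide) hi hg]
      have : ((c.toNat - 65 : Nat) : Int) = (c.toNat : Int) - 65 := by omega
      rw [this]; ring
    · have hnl : c ∉ pvLowerA := by
        intro hm
        have hbound : ∀ t ∈ pvLowerA.map Char.toNat, 97 ≤ t ∧ t ≤ 122 := by decide
        exact h1 (hbound _ (List.mem_map_of_mem hm))
      have hnu : c ∉ pvUpperA := by
        intro hm
        have hbound : ∀ t ∈ pvUpperA.map Char.toNat, 65 ≤ t ∧ t ≤ 90 := by decide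
        exact h2 (hbound _ (List.mem_map_of_mem hm))
      rw [if_neg hnl, if_neg hnu, if_neg h1, if_neg h2]

-- ===== VERDICT (by name: the statement is the Claim_ definition above) =====
theorem duplicate_value_spec : Claim_equal_duplicate_value := by
  intro d _
  unfold Spec_duplicate_value duplicate_value duplicate_value_alt
  induction d.toList using List.reverseRecOn with
  | nil => rfl
  | append_singleton xs x ih =>
      rw [List.foldl_append, List.foldl_append, ih, List.foldl_cons, List.foldl_cons,
        List.foldl_nil, List.foldl_nil, pv_step_eq]
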